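-- pv_equiv track=rewrite | github.com/nofi-sys/AUDIOBOOKSV2 | glossary_builder_spacy.py | _category_for_propn
-- ===== SOURCE A (Python) =====
-- from typing import Dict, Iterable, List, Sequence
--
-- def _category_for_propn(tokens_norm: Sequence[str]) -> str:
--     heuristics_place = {"rio", "cerro", "monte", "villa", "ciudad", "puerto", "san", "santa"}
--     heuristics_org = {"sociedad", "fundacion", "asociacion", "universidad", "club"}
--     if any(tok in heuristics_place for tok in tokens_norm):
--         return "place"
--     if any(tok in heuristics_org for tok in tokens_norm):
--         return "org"
--     return "person"
-- ===== SOURCE B (Python) =====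
-- def _category_for_propn(tokens_norm):
--     heuristics_place = {"rio", "cerro", "monte", "villa", "ciudad", "puerto", "san", "santa"}
--     heuristics_org = {"sociedad", "fundacion", "asociacion", "universidad", "club"}
--     org_seen = False
--     for tok in tokens_norm:
--         if tok in heuristics_place:
--             return "place"
--         if tok in heuristics_org:
--             org_seen = True
--     return "org" if org_seen else "person"
-- ===== Notes on version B (the rewrite author's own statement) =====
-- stated objective: alternative
-- what changed: Replaces A's two separate any() passes over the token list with a single loop that returns 'place' eagerly and records an org hit in a flag resolved after the scan.
import Mathlib
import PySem

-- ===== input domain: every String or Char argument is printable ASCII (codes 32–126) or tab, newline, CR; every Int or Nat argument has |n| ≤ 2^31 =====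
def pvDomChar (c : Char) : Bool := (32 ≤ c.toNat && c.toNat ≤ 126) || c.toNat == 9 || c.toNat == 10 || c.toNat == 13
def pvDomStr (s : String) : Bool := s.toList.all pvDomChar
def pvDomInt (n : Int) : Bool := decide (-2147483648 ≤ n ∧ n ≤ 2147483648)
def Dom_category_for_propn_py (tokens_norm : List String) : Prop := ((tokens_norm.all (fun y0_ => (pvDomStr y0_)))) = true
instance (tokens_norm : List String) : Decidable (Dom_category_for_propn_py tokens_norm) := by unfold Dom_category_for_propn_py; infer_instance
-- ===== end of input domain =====

-- B replaces A's two separate any() passes with one loop: eager return on a place hit, an org flag resolved after the scan (objective: alternative decomposition, same cost).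

-- ===== PORT A =====
def pvHeuristicsPlace : PySem.Set String :=
  PySem.Set.ofList ["rio", "cerro", "monte", "villa", "ciudad", "puerto", "san", "santa"]
def pvHeuristicsOrg : PySem.Set String :=
  PySem.Set.ofList ["sociedad", "fundacion", "asociacion", "universidad", "club"]

def category_for_propn_py (tokens_norm : List String) : String :=
  if tokens_norm.any (fun tok => pvHeuristicsPlace.contains tok) then "place"
  else if tokens_norm.any (fun tok => pvHeuristicsOrg.contains tok) then "org"
  else "person"

-- ===== PORT B =====
def pvLoopB : List String → Bool → String
  | [], orgSeen => if orgSeen then "org" else "person"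
  | tok :: rest, orgSeen =>
    if pvHeuristicsPlace.contains tok then "place"
    else pvLoopB rest (if pvHeuristicsOrg.contains tok then true else orgSeen)

def category_for_propn_py_alt (tokens_norm : List String) : String :=
  pvLoopB tokens_norm false

-- ===== PRECONDITION & SPEC =====
def Spec_category_for_propn_py (tokens_norm : List String) (out : String) : Prop := out = category_for_propn_py_alt tokens_norm
instance (tokens_norm : List String) (out : String) : Decidable (Spec_category_for_propn_py tokens_norm out) := by unfold Spec_category_for_propn_py; infer_instance

-- ===== CLAIM (what is proved, stated in full; the proofs are below) =====
def Claim_equal_category_for_propn_py : Prop := ∀ (tokens_norm : List String), Dom_category_for_propn_py tokens_norm → Spec_category_for_propn_py tokens_norm (category_for_propn_py tokens_norm)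

-- ===== LEMMAS AND PROOFS =====
theorem pvLoopB_char (l : List String) (orgSeen : Bool) :
    pvLoopB l orgSeen =
      if l.any (fun tok => pvHeuristicsPlace.contains tok) then "place"
      else if (l.any (fun tok => pvHeuristicsOrg.contains tok) || orgSeen) then "org"
      else "person" := by
  induction l generalizing orgSeen with
  | nil => simp [pvLoopB]
  | cons tok rest ih =>
    by_cases hp : tok ∈ pvHeuristicsPlace <;>
      by_cases ho : tok ∈ pvHeuristicsOrg <;>
        simp [pvLoopB, ih, hp, ho, Bool.or_comm]

-- ===== VERDICT (by name: the statement is the Claim_ definition above) =====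
theorem category_for_propn_py_spec : Claim_equal_category_for_propn_py := by
  intro tokens_norm _
  unfold Spec_category_for_propn_py category_for_propn_py category_for_propn_py_alt
  rw [pvLoopB_char]
  simp
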